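-- pv_equiv track=rewrite | github.com/BuilderBenv1/brain-v | scripts/run_nomenclator_nlref.py | eva_tokenize
-- ===== SOURCE A (Python) =====
-- MULTI_GLYPHS = ["ckh", "cth", "cph", "ch", "sh"]
--
-- def eva_tokenize(word):
--     out = []; i = 0
--     while i < len(word):
--         matched = False
--         for t in MULTI_GLYPHS:
--             if word.startswith(t, i):
--                 out.append(t); i += len(t); matched = True; break
--         if not matched:
--             out.append(word[i]); i += 1
--     return out
-- ===== SOURCE B (Python) =====
-- def eva_tokenize(word):
--     out = []
--     rest = word
--     while rest:
--         tok = rest[:3] if rest[:3] in ("ckh", "cth", "cph") else \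
--               rest[:2] if rest[:2] in ("ch", "sh") else rest[0]
--         out.append(tok)
--         rest = rest[len(tok):]
--     return out
-- ===== Notes on version B (the rewrite author's own statement) =====
-- stated objective: simpler
-- what changed: Replaces the index-and-inner-table-scan loop with a suffix-consuming loop that picks the token directly by slice membership (3-char glyphs, then 2-char glyphs, else one char), with no glyph-table iteration and no index bookkeeping.
import Mathlib
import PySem

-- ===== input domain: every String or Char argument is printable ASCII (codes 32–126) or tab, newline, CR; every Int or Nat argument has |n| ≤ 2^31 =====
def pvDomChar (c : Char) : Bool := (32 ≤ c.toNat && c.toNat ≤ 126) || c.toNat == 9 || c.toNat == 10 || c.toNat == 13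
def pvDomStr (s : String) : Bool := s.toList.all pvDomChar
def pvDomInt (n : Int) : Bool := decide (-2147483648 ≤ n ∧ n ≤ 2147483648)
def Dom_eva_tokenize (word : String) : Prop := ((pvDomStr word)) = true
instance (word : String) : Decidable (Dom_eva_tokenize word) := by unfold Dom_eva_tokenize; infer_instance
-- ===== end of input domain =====

-- B replaces A's index-plus-glyph-table scan by a suffix-consuming loop choosing the token
-- by slice membership (simpler; same return value everywhere).

-- ===== PORT A =====
def pvMultiGlyphs : List String := ["ckh", "cth", "cph", "ch", "sh"]

-- the inner 'for t in MULTI_GLYPHS: if word.startswith(t, i): … break' is List.find?;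
-- word.startswith(t, i) is ported by hand (exact): t is a prefix of the suffix of word at i.
def evaLoopA (cs : List Char) (out : List String) (i : Nat) : List String :=
  if _h : i < cs.length then
    match hf : pvMultiGlyphs.find? (fun t => t.toList.isPrefixOf (cs.drop i)) with
    | some t => evaLoopA cs (out ++ [t]) (i + t.toList.length)
    | none => evaLoopA cs (out ++ [String.ofList [cs.getD i ' ']]) (i + 1)
  else out
termination_by cs.length - i
decreasing_by
  · have ht : t ∈ pvMultiGlyphs := List.mem_of_find?_eq_some hf
    have : 1 ≤ t.toList.length := by
      simp only [pvMultiGlyphs, List.mem_cons, List.not_mem_nil, or_false] at ht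
      rcases ht with h|h|h|h|h <;> subst h <;> decide
    omega
  · omega

def eva_tokenize (word : String) : List String := evaLoopA word.toList [] 0

-- ===== PORT B =====
def evaLoopB (rest : List Char) (out : List String) : List String :=
  if _h : rest = [] then out
  else
    let tok : String :=
      if String.ofList (rest.take 3) ∈ (["ckh", "cth", "cph"] : List String) then String.ofList (rest.take 3)
      else if String.ofList (rest.take 2) ∈ (["ch", "sh"] : List String) then String.ofList (rest.take 2)
      else String.ofList (rest.take 1)
    evaLoopB (rest.drop tok.toList.length) (out ++ [tok])
termination_by rest.length
decreasing_by
  have h1 : 1 ≤ rest.length := by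
    cases rest with
    | nil => exact absurd rfl _h
    | cons a l => simp
  simp only [List.length_drop]
  split_ifs <;> simp only [String.toList_ofList, List.length_take] <;> omega

def eva_tokenize_alt (word : String) : List String := evaLoopB word.toList []

-- ===== PRECONDITION & SPEC =====
def Spec_eva_tokenize (word : String) (out : List String) : Prop := out = eva_tokenize_alt word
instance (word : String) (out : List String) : Decidable (Spec_eva_tokenize word out) := by unfold Spec_eva_tokenize; infer_instance

-- ===== CLAIM (what is proved, stated in full; the proofs are below) =====
def Claim_equal_eva_tokenize : Prop := ∀ (word : String), Dom_eva_tokenize word → Spec_eva_tokenize word (eva_tokenize word)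

-- ===== LEMMAS AND PROOFS =====

lemma pv_find?_cons {α : Type} (p : α → Bool) (a : α) (l : List α) :
    List.find? p (a :: l) = if p a = true then some a else List.find? p l := by
  cases h : p a <;> simp [h]

lemma pv_pfx_iff (g l : List Char) : (g.isPrefixOf l = true) ↔ l.take g.length = g := by
  rw [List.isPrefixOf_iff_prefix, List.prefix_iff_eq_take, eq_comm]

lemma pv_npfx (g l : List Char) (h : String.ofList (l.take g.length) ≠ String.ofList g) :
    g.isPrefixOf l = false := by
  rw [← Bool.not_eq_true, pv_pfx_iff]
  intro he
  exact h (congrArg String.ofList he)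

lemma pv_tok_eq (a : Char) (s : List Char) :
    (match pvMultiGlyphs.find? (fun t => t.toList.isPrefixOf (a :: s)) with
      | some t => t
      | none => String.ofList [a])
    = (if String.ofList ((a :: s).take 3) ∈ (["ckh", "cth", "cph"] : List String) then String.ofList ((a :: s).take 3)
       else if String.ofList ((a :: s).take 2) ∈ (["ch", "sh"] : List String) then String.ofList ((a :: s).take 2)
       else String.ofList ((a :: s).take 1)) := by
  by_cases h3 : String.ofList ((a :: s).take 3) ∈ (["ckh", "cth", "cph"] : List String)
  · rw [if_pos h3]
    simp only [List.mem_cons, List.not_mem_nil, or_false] at h3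
    rcases h3 with h | h | h
    · have p1 : ("ckh" : String).toList.isPrefixOf (a :: s) = true :=
        (pv_pfx_iff _ _).mpr (String.ofList_inj.mp h)
      simp only [pvMultiGlyphs, pv_find?_cons, p1, if_true]
      exact h.symm
    · have ht : (a :: s).take 3 = ['c', 't', 'h'] := String.ofList_inj.mp h
      have p1 : ("ckh" : String).toList.isPrefixOf (a :: s) = false := by
        apply pv_npfx; rw [show ("ckh" : String).toList.length = 3 from rfl, ht]; decide
      have p2 : ("cth" : String).toList.isPrefixOf (a :: s) = true :=
        (pv_pfx_iff _ _).mpr ht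
      simp only [pvMultiGlyphs, pv_find?_cons, p1, p2, if_true]
      exact h.symm
    · have ht : (a :: s).take 3 = ['c', 'p', 'h'] := String.ofList_inj.mp h
      have p1 : ("ckh" : String).toList.isPrefixOf (a :: s) = false := by
        apply pv_npfx; rw [show ("ckh" : String).toList.length = 3 from rfl, ht]; decide
      have p2 : ("cth" : String).toList.isPrefixOf (a :: s) = false := by
        apply pv_npfx; rw [show ("cth" : String).toList.length = 3 from rfl, ht]; decide
      have p3 : ("cph" : String).toList.isPrefixOf (a :: s) = true :=
        (pv_pfx_iff _ _).mpr ht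
      simp only [pvMultiGlyphs, pv_find?_cons, p1, p2, p3, if_true]
      exact h.symm
  · have hn3 : ∀ g : List Char, g.length = 3 → String.ofList g ∈ (["ckh", "cth", "cph"] : List String) →
        g.isPrefixOf (a :: s) = false := by
      intro g hg hmem
      apply pv_npfx
      rw [hg]
      intro he
      rw [he] at h3
      exact h3 hmem
    have p1 : ("ckh" : String).toList.isPrefixOf (a :: s) = false := hn3 _ rfl (by decide)
    have p2 : ("cth" : String).toList.isPrefixOf (a :: s) = false := hn3 _ rfl (by decide)
    have p3 : ("cph" : String).toList.isPrefixOf (a :: s) = false := hn3 _ rfl (by decide)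
    rw [if_neg h3]
    by_cases h2 : String.ofList ((a :: s).take 2) ∈ (["ch", "sh"] : List String)
    · rw [if_pos h2]
      simp only [List.mem_cons, List.not_mem_nil, or_false] at h2
      rcases h2 with h | h
      · have p4 : ("ch" : String).toList.isPrefixOf (a :: s) = true :=
          (pv_pfx_iff _ _).mpr (String.ofList_inj.mp h)
        simp only [pvMultiGlyphs, pv_find?_cons, p1, p2, p3, p4, if_true]
        exact h.symm
      · have ht : (a :: s).take 2 = ['s', 'h'] := String.ofList_inj.mp h
        have p4 : ("ch" : String).toList.isPrefixOf (a :: s) = false := by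
          apply pv_npfx; rw [show ("ch" : String).toList.length = 2 from rfl, ht]; decide
        have p5 : ("sh" : String).toList.isPrefixOf (a :: s) = true :=
          (pv_pfx_iff _ _).mpr ht
        simp only [pvMultiGlyphs, pv_find?_cons, p1, p2, p3, p4, p5, if_true]
        exact h.symm
    · rw [if_neg h2]
      have hn2 : ∀ g : List Char, g.length = 2 → String.ofList g ∈ (["ch", "sh"] : List String) →
          g.isPrefixOf (a :: s) = false := by
        intro g hg hmem
        apply pv_npfx
        rw [hg]
        intro he
        rw [he] at h2
        exact h2 hmem
      have p4 : ("ch" : String).toList.isPrefixOf (a :: s) = false := hn2 _ rfl (by decide)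
      have p5 : ("sh" : String).toList.isPrefixOf (a :: s) = false := hn2 _ rfl (by decide)
      simp only [pvMultiGlyphs, pv_find?_cons, p1, p2, p3, p4, p5]
      simp

lemma pv_glyph_len {t : String} (ht : t ∈ pvMultiGlyphs) : 1 ≤ t.toList.length := by
  simp only [pvMultiGlyphs, List.mem_cons, List.not_mem_nil, or_false] at ht
  rcases ht with h|h|h|h|h <;> subst h <;> decide

lemma pv_loops_eq : ∀ (n : Nat) (cs : List Char) (i : Nat) (out : List String),
    cs.length - i = n → evaLoopA cs out i = evaLoopB (cs.drop i) out := by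
  intro n
  induction n using Nat.strong_induction_on with
  | _ n ih =>
    intro cs i out hn
    rw [evaLoopA, evaLoopB.eq_def]
    by_cases h : i < cs.length
    · obtain ⟨a, s, hd⟩ : ∃ a s, cs.drop i = a :: s := by
        cases hcs : cs.drop i with
        | nil =>
          have := congrArg List.length hcs
          simp at this
          omega
        | cons a s => exact ⟨a, s, rfl⟩
      rw [hd]
      rw [dif_pos h, dif_neg (List.cons_ne_nil a s)]
      split
      · rename_i t hf
        have hts := pv_tok_eq a s
        rw [hf] at hts
        have hts' : t = _ := hts
        rw [← hts']
        have htl : 1 ≤ t.toList.length := pv_glyph_len (List.mem_of_find?_eq_some hf)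
        have hdd : (a :: s).drop t.toList.length = cs.drop (i + t.toList.length) := by
          rw [← hd, List.drop_drop, Nat.add_comm]
        show _ = evaLoopB ((a :: s).drop t.toList.length) (out ++ [t])
        rw [hdd, ih (cs.length - (i + t.toList.length)) (by omega) cs (i + t.toList.length)
          (out ++ [t]) rfl]
      · rename_i hf
        have hts := pv_tok_eq a s
        rw [hf] at hts
        have hts' : String.ofList [a] = _ := hts
        rw [← hts']
        have hget : cs.getD i ' ' = a := by
          have h0 : (cs.drop i).getD 0 ' ' = a := by rw [hd]; rfl
          rwa [List.getD_eq_getElem?_getD, List.getElem?_drop, Nat.add_zero,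
            ← List.getD_eq_getElem?_getD] at h0
        rw [hget]
        have hds : cs.drop (i + 1) = s := by
          have h1 := congrArg (List.drop 1) hd
          rw [List.drop_drop] at h1
          simpa [Nat.add_comm] using h1
        have hlen : (String.ofList [a]).toList.length = 1 := by simp
        show _ = evaLoopB ((a :: s).drop (String.ofList [a]).toList.length)
          (out ++ [String.ofList [a]])
        rw [hlen, ih (cs.length - (i + 1)) (by omega) cs (i + 1) (out ++ [String.ofList [a]]) rfl,
          hds]
        simp
    · have hdnil : cs.drop i = [] := List.drop_eq_nil_of_le (by omega)
      rw [dif_neg h, hdnil, dif_pos rfl]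

-- ===== VERDICT (by name: the statement is the Claim_ definition above) =====
theorem eva_tokenize_spec : Claim_equal_eva_tokenize := by
  intro word _
  unfold Spec_eva_tokenize eva_tokenize eva_tokenize_alt
  simpa using pv_loops_eq (word.toList.length) word.toList 0 [] rfl
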